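-- pv_equiv track=rewrite | github.com/RonRole/scrap_code | yumemi_serverside/main.py | make_player_score_dict
-- ===== SOURCE A (Python) =====
-- def make_player_score_dict(playlog):
--     res = dict()
--     for row in playlog:
--         player_id, score = row[0], row[1]
--
--         if not res.get(player_id):
--             res[player_id] = (score, 1)
--         else:
--             current_score, current_count = res[player_id][0], res[player_id][1]
--             res[player_id] = (current_score + score, current_count + 1)
--     return res
-- ===== SOURCE B (Python) =====
-- def make_player_score_dict(playlog):
--     # Group-by without an incremental accumulator table: list the distinct
--     # player ids in first-occurrence order, then scan the log once per id,
--     # summing its scores and counting its rows.  Return value only.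
--     ids = list(dict.fromkeys(row[0] for row in playlog))
--     return {pid: (sum(row[1] for row in playlog if row[0] == pid),
--                   sum(1 for row in playlog if row[0] == pid))
--             for pid in ids}
-- ===== Notes on version B (the rewrite author's own statement) =====
-- stated objective: alternative
-- what changed: Replaces A's single-pass loop that incrementally updates a dict of (sum,count) tuples with a grouping scheme: first extract the distinct player ids in first-occurrence order, then compute each id's sum and count by separate scans over the playlog (no accumulator table at all).
import Mathlib
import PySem

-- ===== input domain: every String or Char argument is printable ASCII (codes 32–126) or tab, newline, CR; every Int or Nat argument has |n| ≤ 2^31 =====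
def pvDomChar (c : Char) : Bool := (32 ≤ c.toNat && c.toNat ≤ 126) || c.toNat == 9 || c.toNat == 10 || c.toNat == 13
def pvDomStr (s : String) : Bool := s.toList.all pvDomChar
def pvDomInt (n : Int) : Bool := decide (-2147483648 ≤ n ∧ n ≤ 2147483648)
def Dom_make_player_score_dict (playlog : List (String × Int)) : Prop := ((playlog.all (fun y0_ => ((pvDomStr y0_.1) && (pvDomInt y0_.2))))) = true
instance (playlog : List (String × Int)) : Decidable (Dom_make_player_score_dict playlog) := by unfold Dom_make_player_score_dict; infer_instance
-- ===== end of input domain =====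

-- B replaces A's single-pass incremental (sum,count) dict with a group-by scheme:
-- distinct ids in first-occurrence order, then one scan of the log per id; return value only.

-- ===== PORT A =====
-- `if not res.get(player_id)` tests falsiness; the stored values are nonempty
-- tuples (always truthy), so the branch fires exactly when get returns None.
def make_player_score_dict (playlog : List (String × Int)) : List (String × Int × Int) :=
  (playlog.foldl (fun res row =>
      match res.get? row.1 with
      | none => res.insert row.1 (row.2, 1)
      | some p => res.insert row.1 (p.1 + row.2, p.2 + 1))
    (PySem.Dict.empty : PySem.Dict String (Int × Int))).items

-- ===== PORT B =====
def make_player_score_dict_alt (playlog : List (String × Int)) : List (String × Int × Int) :=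
  let ids := PySem.List.dedup (playlog.map (·.1))
  ids.map (fun pid =>
    (pid, ((playlog.filter (fun row => row.1 == pid)).map (·.2)).sum,
          ((playlog.countP (fun row => row.1 == pid) : Nat) : Int)))

-- ===== PRECONDITION & SPEC =====
def Spec_make_player_score_dict (playlog : List (String × Int)) (out : List (String × Int × Int)) : Prop := out = make_player_score_dict_alt playlog
instance (playlog : List (String × Int)) (out : List (String × Int × Int)) : Decidable (Spec_make_player_score_dict playlog out) := by unfold Spec_make_player_score_dict; infer_instance

-- ===== CLAIM (what is proved, stated in full; the proofs are below) =====
def Claim_equal_make_player_score_dict : Prop := ∀ (playlog : List (String × Int)), Dom_make_player_score_dict playlog → Spec_make_player_score_dict playlog (make_player_score_dict playlog)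

-- ===== LEMMAS AND PROOFS =====

-- A's loop body, with the inserted value factored out so the keys lemmas apply
def pvVal (res : PySem.Dict String (Int × Int)) (row : String × Int) : Int × Int :=
  match res.get? row.1 with
  | none => (row.2, 1)
  | some p => (p.1 + row.2, p.2 + 1)

theorem pvStep_eq (res : PySem.Dict String (Int × Int)) (row : String × Int) :
    (match res.get? row.1 with
      | none => res.insert row.1 (row.2, 1)
      | some p => res.insert row.1 (p.1 + row.2, p.2 + 1))
    = res.insert row.1 (pvVal res row) := by
  unfold pvVal; cases res.get? row.1 <;> rfl

-- pointwise characterisation of A's running dict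
theorem pvGet (l : List (String × Int)) (d : PySem.Dict String (Int × Int)) (pid : String) :
    (l.foldl (fun res row => res.insert row.1 (pvVal res row)) d).get? pid
    = match d.get? pid with
      | none =>
          if l.countP (fun row => row.1 == pid) = 0 then none
          else some (((l.filter (fun row => row.1 == pid)).map (·.2)).sum,
                     (l.countP (fun row => row.1 == pid) : Int))
      | some p => some (p.1 + ((l.filter (fun row => row.1 == pid)).map (·.2)).sum,
                        p.2 + (l.countP (fun row => row.1 == pid) : Int)) := by
  induction l generalizing d with
  | nil => cases h : d.get? pid <;> simp [h]
  | cons row tl ih =>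
    simp only [List.foldl_cons, ih, PySem.Dict.get?_insert]
    have hcnt : List.countP (fun r => r.1 == pid) (row :: tl)
        = List.countP (fun r => r.1 == pid) tl + (if row.1 == pid then 1 else 0) :=
      List.countP_cons
    have hflt : List.filter (fun r => r.1 == pid) (row :: tl)
        = if row.1 == pid then row :: List.filter (fun r => r.1 == pid) tl
          else List.filter (fun r => r.1 == pid) tl := List.filter_cons
    by_cases hk : pid = row.1
    · subst hk
      rw [if_pos rfl]
      simp only [hcnt, hflt, beq_self_eq_true, if_true]
      cases h : d.get? row.1 with
      | none =>
        simp [pvVal, h, Prod.ext_iff]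
        try constructor
        all_goals ring
      | some p =>
        simp [pvVal, h, Prod.ext_iff]
        try constructor
        all_goals ring
    · have hk' : (row.1 == pid) = false := beq_eq_false_iff_ne.mpr (fun h => hk h.symm)
      rw [if_neg hk]
      simp only [hcnt, hflt, hk']
      simp only [Bool.false_eq_true, if_false, Nat.add_zero]

theorem pvGet_empty (l : List (String × Int)) (pid : String) (h : pid ∈ l.map (·.1)) :
    (l.foldl (fun res row => res.insert row.1 (pvVal res row))
        (PySem.Dict.empty : PySem.Dict String (Int × Int))).get? pid
    = some (((l.filter (fun row => row.1 == pid)).map (·.2)).sum,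
            (l.countP (fun row => row.1 == pid) : Int)) := by
  rw [pvGet]
  have hc : l.countP (fun row => row.1 == pid) ≠ 0 := by
    simp only [List.mem_map] at h
    obtain ⟨r, hr, hfst⟩ := h
    have : 0 < l.countP (fun row => row.1 == pid) :=
      List.countP_pos_iff.mpr ⟨r, hr, by simp [hfst]⟩
    omega
  simp [PySem.Dict.get?_empty, hc]

-- ===== VERDICT (by name: the statement is the Claim_ definition above) =====
theorem make_player_score_dict_spec : Claim_equal_make_player_score_dict := by
  intro playlog _
  show _ = _
  unfold make_player_score_dict make_player_score_dict_alt
  simp only [pvStep_eq]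
  have hnd : (playlog.foldl (fun res row => res.insert row.1 (pvVal res row))
      (PySem.Dict.empty : PySem.Dict String (Int × Int))).keys.Nodup := by
    exact PySem.Dict.nodup_keys_foldl_insert_key playlog (·.1) pvVal _
      PySem.Dict.nodup_keys_empty
  have hkeys : (playlog.foldl (fun res row => res.insert row.1 (pvVal res row))
      (PySem.Dict.empty : PySem.Dict String (Int × Int))).keys
      = PySem.List.dedup (playlog.map (·.1)) := by
    rw [PySem.Dict.keys_foldl_insert_key]
    rfl
  rw [PySem.Dict.items_eq_map_keys _ hnd (0, 0), hkeys]
  apply List.map_congr_left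
  intro pid hpid
  have hmem : pid ∈ playlog.map (·.1) := by
    rw [← PySem.List.mem_dedup]; exact hpid
  rw [PySem.Dict.getD_eq_get?_getD, pvGet_empty playlog pid hmem]
  rfl
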